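-- pv_equiv track=rewrite | github.com/JoonBeomLee/Algorithm_Python | site/PROGRAMMERS/src/python/스킬테스트/level02/이진변환반복하기.py | remove_zero
-- ===== SOURCE A (Python) =====
-- def remove_zero(num_str):
--     result = ''
--     zero_count = 0
--
--     for num in num_str:
--         if num == '1':
--             result += num
--         else:
--             zero_count += 1
--
--     return result, zero_count
-- ===== SOURCE B (Python) =====
-- def remove_zero(num_str):
--     ones = num_str.count('1')
--     return '1' * ones, len(num_str) - ones
-- ===== Notes on version B (the rewrite author's own statement) =====
-- stated objective: faster
-- what changed: Replaces the per-character loop with its two accumulators by a single substring count, building the result by string repetition and computing the zero count as length minus the ones count.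
import Mathlib
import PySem

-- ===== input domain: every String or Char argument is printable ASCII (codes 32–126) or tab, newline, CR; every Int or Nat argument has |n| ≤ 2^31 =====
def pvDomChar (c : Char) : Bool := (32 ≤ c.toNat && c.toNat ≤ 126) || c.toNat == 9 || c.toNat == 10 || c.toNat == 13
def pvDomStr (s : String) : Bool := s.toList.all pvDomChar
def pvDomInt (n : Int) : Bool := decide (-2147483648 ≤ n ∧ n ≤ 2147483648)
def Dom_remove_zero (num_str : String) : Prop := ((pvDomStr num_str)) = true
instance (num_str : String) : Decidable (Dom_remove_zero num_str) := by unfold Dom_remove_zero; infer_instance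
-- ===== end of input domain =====

-- B replaces A's per-character loop by a single substring count plus string repetition and a length subtraction (measured faster by a constant factor).

-- ===== PORT A =====
-- string concatenation is modelled on List Char (result accumulated as a char list, packed at the end)
def remove_zero (num_str : String) : String × Int :=
  let st := num_str.toList.foldl
    (fun (st : List Char × Int) num =>
      if num == '1' then (st.1 ++ [num], st.2) else (st.1, st.2 + 1))
    ([], 0)
  (String.mk st.1, st.2)

-- ===== PORT B =====
def remove_zero_alt (num_str : String) : String × Int :=
  let ones := PySem.Str.count num_str "1"
  -- '1' * ones on strings is modelled as List.replicate on the char list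
  (String.mk (List.replicate ones '1'), (PySem.Str.len num_str : Int) - (ones : Int))

-- ===== PRECONDITION & SPEC =====
def Spec_remove_zero (num_str : String) (out : String × Int) : Prop := out = remove_zero_alt num_str
instance (num_str : String) (out : String × Int) : Decidable (Spec_remove_zero num_str out) := by unfold Spec_remove_zero; infer_instance

-- ===== CLAIM (what is proved, stated in full; the proofs are below) =====
def Claim_equal_remove_zero : Prop := ∀ (num_str : String), Dom_remove_zero num_str → Spec_remove_zero num_str (remove_zero num_str)

-- ===== LEMMAS AND PROOFS =====

-- PySem's substring count, for the single-character needle '1', is List.count.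
theorem count_go_one (l : List Char) : ∀ (fuel acc : Nat), l.length ≤ fuel →
    PySem.Chars.count.go ['1'] fuel l acc = acc + l.count '1' := by
  induction l with
  | nil => intro fuel acc h; cases fuel <;> simp [PySem.Chars.count.go]
  | cons c t ih =>
    intro fuel acc h
    cases fuel with
    | zero => simp at h
    | succ f =>
      simp only [PySem.Chars.count.go]
      by_cases hc : c = '1'
      · subst hc
        simp [List.isPrefixOf, ih f (acc + 1) (by simpa using h)]
        omega
      · simp [List.isPrefixOf, hc, Ne.symm hc, ih f acc (by simpa using h)]

theorem count_one (l : List Char) : PySem.Chars.count l ['1'] = l.count '1' := by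
  simp [PySem.Chars.count, count_go_one l l.length 0 le_rfl]

-- A's loop, with its two accumulators generalized.
theorem loopA (l : List Char) : ∀ (a : List Char) (z : Int),
    l.foldl (fun (st : List Char × Int) num =>
        if num == '1' then (st.1 ++ [num], st.2) else (st.1, st.2 + 1)) (a, z)
      = (a ++ List.replicate (l.count '1') '1', z + ((l.length : Int) - (l.count '1' : Int))) := by
  induction l with
  | nil => intro a z; simp
  | cons c t ih =>
    intro a z
    rw [List.foldl_cons]
    by_cases hc : c = '1'
    · subst hc
      simp only [beq_self_eq_true, if_true]
      rw [ih]
      refine Prod.ext ?_ ?_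
      · simp [List.replicate_succ]
      · simp
    · have hb : (c == '1') = false := by simp [hc]
      rw [hb]
      simp only [Bool.false_eq_true, if_false]
      rw [ih]
      refine Prod.ext ?_ ?_
      · simp [hc]
      · simp [hc]; ring

-- ===== VERDICT (by name: the statement is the Claim_ definition above) =====
theorem remove_zero_spec : Claim_equal_remove_zero := by
  intro num_str _
  unfold Spec_remove_zero remove_zero remove_zero_alt
  rw [loopA]
  simp [count_one, PySem.Str.count, PySem.Str.len]
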